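-- pv_equiv track=rewrite | github.com/iddev5/uni | aimllab/day1/alpha-beta-3-out.py | expand
-- ===== SOURCE A (Python) =====
-- def factors(n): return [(i, n - i) for i in range(1, n) if i < n - i]
--
-- def make_child(p, c, f):
--     s = list(p); s.remove(c); s.extend(f)
--     return tuple(sorted(s, reverse=True))
--
-- def expand(start):
--     v, q, steps = {start: 0}, [(start, 0)], []
--     while q:
--         p, d = q.pop(0)
--         for c in p:
--             for f in factors(c):
--                 ch = make_child(p, c, f)
--                 if ch not in v: v[ch], q = d + 1, q + [(ch, d + 1)]
--                 if v[ch] == d + 1: steps.append((p, ch, d + 1))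
--     return steps, v
-- ===== SOURCE B (Python) =====
-- def make(p, c, i):
--     j = p.index(c)
--     return tuple(sorted(p[:j] + p[j + 1:] + (i, c - i), reverse=True))
--
-- def children(p):
--     return [make(p, c, i) for c in p for i in range(1, (c + 1) // 2)]
--
-- def expand(start):
--     v, steps, frontier, d = {start: 0}, [], [start], 0
--     while frontier:
--         nxt = []
--         for p in frontier:
--             kids = children(p)
--             steps += [(p, ch, d + 1) for ch in kids]
--             for ch in kids:
--                 if ch not in v:
--                     v[ch] = d + 1
--                     nxt.append(ch)
--         frontier, d = nxt, d + 1
--     return steps, v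
-- ===== Notes on version B (the rewrite author's own statement) =====
-- stated objective: alternative
-- what changed: Replaced the FIFO queue of (state, depth) pairs by a level-synchronous BFS with frontier/next-frontier lists and a depth counter; children of a state are computed by a pure function that removes the split part by index/slicing and enumerates splits with the closed-form range(1,(c+1)//2) instead of filtering range(1,c); every level's edges are recorded in one bulk append (A's depth check v[ch]==d+1 provably always holds since a recorded depth is always length minus len(start)), and the visited dict / next frontier are updated in a separate visiting pass.
import Mathlib
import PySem

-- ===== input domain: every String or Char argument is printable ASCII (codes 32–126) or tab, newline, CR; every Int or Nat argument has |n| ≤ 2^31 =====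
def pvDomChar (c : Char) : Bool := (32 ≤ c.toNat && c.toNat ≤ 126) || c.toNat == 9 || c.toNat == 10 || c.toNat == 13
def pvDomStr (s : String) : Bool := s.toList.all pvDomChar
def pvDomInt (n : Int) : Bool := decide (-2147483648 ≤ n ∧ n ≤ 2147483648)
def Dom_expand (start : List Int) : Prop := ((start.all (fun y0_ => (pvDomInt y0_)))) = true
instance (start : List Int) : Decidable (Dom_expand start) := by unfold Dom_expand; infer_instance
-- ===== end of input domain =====

-- B is a level-synchronous BFS decomposed into staged passes: children of a state are computed
-- by a pure function (index/slice removal, closed-form split range), the level's edges are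
-- recorded in one bulk append (A's depth check v[ch]==d+1 provably always holds), and the
-- visited dict / next frontier are updated in a separate visiting pass.
-- Objective: alternative decomposition; both loops are given the same (amply sufficient) fuel
-- to make the recursions total.

-- ===== PORT A =====
def factorsA (n : Int) : List (Int × Int) :=
  ((PySem.List.pyRange 1 n 1).filter (fun i => decide (i < n - i))).map (fun i => (i, n - i))

def makeChildA (p : List Int) (c : Int) (f : Int × Int) : List Int :=
  -- s = list(p); s.remove(c); s.extend(f): c is always a member at call sites, so remove? succeeds
  PySem.List.sorted (((PySem.List.remove? p c).getD p) ++ [f.1, f.2]) (fun x => x) true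

def stepA (p : List Int) (d : Int)
    (st : PySem.Dict (List Int) Int × List (List Int × Int) × List (List Int × List Int × Int))
    (c : Int) (f : Int × Int) :
    PySem.Dict (List Int) Int × List (List Int × Int) × List (List Int × List Int × Int) :=
  let ch := makeChildA p c f
  let vq : PySem.Dict (List Int) Int × List (List Int × Int) :=
    if st.1.contains ch then (st.1, st.2.1) else (st.1.insert ch (d + 1), st.2.1 ++ [(ch, d + 1)])
  let steps := if vq.1.get? ch = some (d + 1) then st.2.2 ++ [(p, ch, d + 1)] else st.2.2
  (vq.1, vq.2, steps)

def innerA (p : List Int) (d : Int)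
    (st : PySem.Dict (List Int) Int × List (List Int × Int) × List (List Int × List Int × Int)) :
    PySem.Dict (List Int) Int × List (List Int × Int) × List (List Int × List Int × Int) :=
  p.foldl (fun st c => (factorsA c).foldl (fun st f => stepA p d st c f) st) st

def loopA (fuel : Nat) (v : PySem.Dict (List Int) Int) (q : List (List Int × Int))
    (steps : List (List Int × List Int × Int)) :
    (List (List Int × List Int × Int)) × (List (List Int × Int)) :=
  match fuel, q with
  | 0, _ => (steps, v.items)
  | _ + 1, [] => (steps, v.items)
  | fuel' + 1, (p, d) :: q' =>
      let st := innerA p d (v, q', steps)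
      loopA fuel' st.1 st.2.1 st.2.2

def pvFuelExpand : Nat := 2 ^ 256

def expand (start : List Int) : (List (List Int × List Int × Int)) × (List (List Int × Int)) :=
  loopA pvFuelExpand (PySem.Dict.ofList [(start, 0)]) [(start, 0)] []

-- ===== PORT B =====
def makeB (p : List Int) (c i : Int) : List Int :=
  -- j = p.index(c); tuple(sorted(p[:j] + p[j+1:] + (i, c - i), reverse=True)); c ∈ p at call sites
  PySem.List.sorted
    (PySem.List.slice p none (some ((PySem.List.index? p c).getD 0 : Nat))
      ++ PySem.List.slice p (some ((((PySem.List.index? p c).getD 0 : Nat) : Int) + 1)) none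
      ++ [i, c - i]) (fun x => x) true

def childrenB (p : List Int) : List (List Int) :=
  p.flatMap (fun c => (PySem.List.pyRange 1 (PySem.Int.floordiv (c + 1) 2) 1).map (makeB p c))

def visitB (st : PySem.Dict (List Int) Int × List (List Int)) (d : Int) (ch : List Int) :
    PySem.Dict (List Int) Int × List (List Int) :=
  if st.1.contains ch then st else (st.1.insert ch (d + 1), st.2 ++ [ch])

def loopB (fuel : Nat) (v : PySem.Dict (List Int) Int) (frontier nxt : List (List Int)) (d : Int)
    (steps : List (List Int × List Int × Int)) :
    (List (List Int × List Int × Int)) × (List (List Int × Int)) :=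
  match fuel, frontier with
  | 0, _ => (steps, v.items)
  | fuel' + 1, [] =>
      match nxt with
      | [] => (steps, v.items)
      | x :: rest => loopB (fuel' + 1) v (x :: rest) [] (d + 1) steps
  | fuel' + 1, p :: rest =>
      let kids := childrenB p
      let st := kids.foldl (fun st ch => visitB st d ch) (v, nxt)
      loopB fuel' st.1 rest st.2 d (steps ++ kids.map (fun ch => (p, ch, d + 1)))
termination_by (fuel, if frontier.isEmpty then 1 else 0)

def expand_alt (start : List Int) : (List (List Int × List Int × Int)) × (List (List Int × Int)) :=
  loopB pvFuelExpand (PySem.Dict.ofList [(start, 0)]) [start] [] 0 []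

-- ===== PRECONDITION & SPEC =====
def Spec_expand (start : List Int) (out : (List (List Int × List Int × Int)) × (List (List Int × Int))) : Prop := out = expand_alt start
instance (start : List Int) (out : (List (List Int × List Int × Int)) × (List (List Int × Int))) : Decidable (Spec_expand start out) := by unfold Spec_expand; infer_instance

-- ===== CLAIM (what is proved, stated in full; the proofs are below) =====
def Claim_equal_expand : Prop := ∀ (start : List Int), Dom_expand start → Spec_expand start (expand start)

-- ===== LEMMAS AND PROOFS =====

-- the values of the visited-dict record the BFS depth, which is always (length - L) for L = len start
def pvInvV (L : Int) (v : PySem.Dict (List Int) Int) : Prop :=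
  ∀ kv ∈ v.items, ((kv.1.length : Int) = L + kv.2)

lemma pv_filter_lt_range (M : Nat) : ∀ (N : Nat),
    (List.range N).filter (fun k => decide (k < M)) = List.range (min M N) := by
  intro N
  induction N with
  | zero => simp
  | succ n ih =>
      rw [List.range_succ, List.filter_append, ih]
      by_cases h : n < M
      · have h1 : min M n = n := by omega
        have h2 : min M (n + 1) = n + 1 := by omega
        simp [h, h1, List.range_succ]
      · have h1 : min M n = M := by omega
        have h2 : min M (n + 1) = M := by omega
        simp [h, h1, h2]

lemma pv_factors_eq (c : Int) :
    factorsA c = (PySem.List.pyRange 1 (PySem.Int.floordiv (c + 1) 2) 1).map (fun i => (i, c - i)) := by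
  have hdm := PySem.Int.floordiv_mul_add_mod (c + 1) 2
  have h0 : (0:Int) ≤ PySem.Int.mod (c + 1) 2 := PySem.Int.mod_nonneg _ (by norm_num)
  have h2 : PySem.Int.mod (c + 1) 2 < 2 := PySem.Int.mod_lt _ (by norm_num)
  set e := PySem.Int.floordiv (c + 1) 2 with he
  unfold factorsA
  rw [PySem.List.pyRange_one 1 c, PySem.List.pyRange_one 1 e]
  rw [List.filter_map, List.map_map, List.map_map]
  congr 1
  have hpred : ∀ k ∈ List.range (c - 1).toNat,
      ((fun i => decide (i < c - i)) ∘ (fun k : Nat => (1:Int) + k)) k = decide (k < (e - 1).toNat) := by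
    intro k _
    simp only [Function.comp_apply, decide_eq_decide]
    omega
  rw [List.filter_congr hpred, pv_filter_lt_range]
  congr 1
  omega

-- the slice-based removal of B equals the remove?-based removal of A
lemma pv_make_eq (p : List Int) (c i : Int) (hc : c ∈ p) :
    makeB p c i = makeChildA p c (i, c - i) := by
  obtain ⟨j, hj⟩ := Option.isSome_iff_exists.mp ((PySem.List.index?_isSome_iff p c).mpr hc)
  have hjq : (PySem.List.index? p c).getD 0 = j := by rw [hj]; rfl
  simp only [makeB, makeChildA, hjq]
  rw [PySem.List.remove?_eq_some_erase p c hc]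
  have h1 : PySem.List.slice p none (some (j : Int)) = p.take j :=
    PySem.List.slice_to_natCast p j
  have h2 : PySem.List.slice p (some ((j : Int) + 1)) none = p.drop (j + 1) := by
    have he : ((j : Int) + 1) = ((j + 1 : Nat) : Int) := by push_cast; ring
    rw [he, PySem.List.slice_from_natCast]
  have herase : p.take j ++ p.drop (j + 1) = p.erase c := by
    rw [List.erase_eq_eraseIdx]
    rw [PySem.List.index?_eq_idxOf?] at hj
    rw [hj]
    exact (List.eraseIdx_eq_take_drop_succ p j).symm
  rw [h1, h2, List.append_assoc, ← List.append_assoc, herase]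
  rfl

lemma pv_child_len (p : List Int) (c : Int) (f : Int × Int) (hc : c ∈ p) :
    (makeChildA p c f).length = p.length + 1 := by
  unfold makeChildA
  rw [PySem.List.remove?_eq_some_erase p c hc]
  have hlen : (p.erase c).length = p.length - 1 := List.length_erase_of_mem hc
  have hpos : 0 < p.length := List.length_pos_of_mem hc
  simp [PySem.List.length_sorted, hlen]
  omega

lemma pv_step_corr (p : List Int) (d L c i : Int) (hc : c ∈ p)
    (v : PySem.Dict (List Int) Int) (nxt : List (List Int))
    (steps : List (List Int × List Int × Int)) (restA : List (List Int × Int))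
    (hv : pvInvV L v) (hn : ∀ x ∈ nxt, (x.length : Int) = L + d + 1)
    (hp : (p.length : Int) = L + d) :
    stepA p d (v, restA ++ nxt.map (fun x => (x, d + 1)), steps) c (i, c - i)
        = ((visitB (v, nxt) d (makeB p c i)).1,
           restA ++ (visitB (v, nxt) d (makeB p c i)).2.map (fun x => (x, d + 1)),
           steps ++ [(p, makeB p c i, d + 1)])
      ∧ pvInvV L (visitB (v, nxt) d (makeB p c i)).1
      ∧ (∀ x ∈ (visitB (v, nxt) d (makeB p c i)).2, (x.length : Int) = L + d + 1) := by
  rw [pv_make_eq p c i hc]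
  have hchl : ((makeChildA p c (i, c - i)).length : Int) = L + d + 1 := by
    rw [pv_child_len p c (i, c - i) hc]; push_cast; omega
  set CH := makeChildA p c (i, c - i) with hCH
  by_cases hcont : v.contains CH = true
  · -- already visited: its recorded depth must be d+1
    have hsome : (v.get? CH).isSome := by
      rw [← PySem.Dict.contains_eq_isSome_get?]; exact hcont
    obtain ⟨dep, hdep⟩ := Option.isSome_iff_exists.mp hsome
    have hmem : (CH, dep) ∈ v.items := PySem.Dict.mem_items_of_get?_eq_some v hdep
    have hd1 : dep = d + 1 := by have := hv _ hmem; simp at this; omega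
    subst hd1
    simp only [stepA, visitB, ← hCH, hcont, if_true, hdep]
    refine ⟨by simp, hv, hn⟩
  · have hcf : v.contains CH = false := by simpa using hcont
    simp only [stepA, visitB, ← hCH, hcf, Bool.false_eq_true, if_false,
      PySem.Dict.get?_insert_self, if_true]
    refine ⟨by simp, ?_, ?_⟩
    · intro kv hkv
      rw [PySem.Dict.items_insert_of_not_contains v _ hcf] at hkv
      rcases List.mem_append.mp hkv with h | h
      · exact hv _ h
      · simp at h; subst h; simp only []; omega
    · intro x hx
      rcases List.mem_append.mp hx with h | h
      · exact hn _ h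
      · simp at h; subst h; exact hchl

lemma pv_foldi_corr (p : List Int) (d L c : Int) (hc : c ∈ p) (hp : (p.length : Int) = L + d) :
    ∀ (il : List Int) (v : PySem.Dict (List Int) Int) (nxt : List (List Int))
      (steps : List (List Int × List Int × Int)) (restA : List (List Int × Int)),
      pvInvV L v → (∀ x ∈ nxt, (x.length : Int) = L + d + 1) →
      il.foldl (fun st i => stepA p d st c (i, c - i)) (v, restA ++ nxt.map (fun x => (x, d + 1)), steps)
          = ((il.foldl (fun st i => visitB st d (makeB p c i)) (v, nxt)).1,
             restA ++ (il.foldl (fun st i => visitB st d (makeB p c i)) (v, nxt)).2.map (fun x => (x, d + 1)),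
             steps ++ il.map (fun i => (p, makeB p c i, d + 1)))
      ∧ pvInvV L (il.foldl (fun st i => visitB st d (makeB p c i)) (v, nxt)).1
      ∧ (∀ x ∈ (il.foldl (fun st i => visitB st d (makeB p c i)) (v, nxt)).2,
          (x.length : Int) = L + d + 1) := by
  intro il
  induction il with
  | nil => intro v nxt steps restA hv hn; exact ⟨by simp, hv, hn⟩
  | cons i il ih =>
      intro v nxt steps restA hv hn
      simp only [List.foldl_cons, List.map_cons]
      obtain ⟨heq, hv', hn'⟩ := pv_step_corr p d L c i hc v nxt steps restA hv hn hp
      rw [heq]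
      obtain ⟨heq2, hv2, hn2⟩ := ih (visitB (v, nxt) d (makeB p c i)).1
        (visitB (v, nxt) d (makeB p c i)).2 (steps ++ [(p, makeB p c i, d + 1)]) restA hv' hn'
      refine ⟨?_, hv2, hn2⟩
      rw [heq2]
      simp

lemma pv_foldc_corr (p : List Int) (d L : Int) (hp : (p.length : Int) = L + d) :
    ∀ (cs : List Int), (∀ x ∈ cs, x ∈ p) →
    ∀ (v : PySem.Dict (List Int) Int) (nxt : List (List Int))
      (steps : List (List Int × List Int × Int)) (restA : List (List Int × Int)),
      pvInvV L v → (∀ x ∈ nxt, (x.length : Int) = L + d + 1) →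
      cs.foldl (fun st c => (factorsA c).foldl (fun st f => stepA p d st c f) st)
          (v, restA ++ nxt.map (fun x => (x, d + 1)), steps)
          = ((cs.flatMap (fun c => (PySem.List.pyRange 1 (PySem.Int.floordiv (c + 1) 2) 1).map
                (makeB p c))).foldl (fun st ch => visitB st d ch) (v, nxt) |>
              (fun W => (W.1,
                restA ++ W.2.map (fun x => (x, d + 1)),
                steps ++ (cs.flatMap (fun c => (PySem.List.pyRange 1 (PySem.Int.floordiv (c + 1) 2) 1).map
                  (makeB p c))).map (fun ch => (p, ch, d + 1)))))
      ∧ pvInvV L ((cs.flatMap (fun c => (PySem.List.pyRange 1 (PySem.Int.floordiv (c + 1) 2) 1).map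
            (makeB p c))).foldl (fun st ch => visitB st d ch) (v, nxt)).1
      ∧ (∀ x ∈ ((cs.flatMap (fun c => (PySem.List.pyRange 1 (PySem.Int.floordiv (c + 1) 2) 1).map
            (makeB p c))).foldl (fun st ch => visitB st d ch) (v, nxt)).2,
          (x.length : Int) = L + d + 1) := by
  intro cs
  induction cs with
  | nil => intro _ v nxt steps restA hv hn; exact ⟨by simp, hv, hn⟩
  | cons c cs ih =>
      intro hmem v nxt steps restA hv hn
      simp only [List.foldl_cons, List.flatMap_cons, List.foldl_append, List.foldl_map,
        List.map_append, List.map_map, pv_factors_eq c]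
      obtain ⟨heq, hv', hn'⟩ := pv_foldi_corr p d L c (hmem c (by simp)) hp
        (PySem.List.pyRange 1 (PySem.Int.floordiv (c + 1) 2) 1) v nxt steps restA hv hn
      rw [heq]
      set W1 := (PySem.List.pyRange 1 (PySem.Int.floordiv (c + 1) 2) 1).foldl
        (fun st i => visitB st d (makeB p c i)) (v, nxt) with hW1
      obtain ⟨heq2, hv2, hn2⟩ := ih (fun x hx => hmem x (List.mem_cons_of_mem _ hx))
        W1.1 W1.2
        (steps ++ (PySem.List.pyRange 1 (PySem.Int.floordiv (c + 1) 2) 1).map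
          (fun i => (p, makeB p c i, d + 1))) restA hv' hn'
      rw [heq2]
      refine ⟨?_, hv2, hn2⟩
      simp [Function.comp_def, List.append_assoc]

lemma pv_loop_corr : ∀ (fuel : Nat) (L d : Int) (v : PySem.Dict (List Int) Int)
    (frontier nxt : List (List Int)) (steps : List (List Int × List Int × Int)),
    pvInvV L v → (∀ x ∈ frontier, (x.length : Int) = L + d) →
    (∀ x ∈ nxt, (x.length : Int) = L + d + 1) →
    loopA fuel v (frontier.map (fun x => (x, d)) ++ nxt.map (fun x => (x, d + 1))) steps
      = loopB fuel v frontier nxt d steps := by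
  intro fuel
  induction fuel with
  | zero =>
      intro L d v frontier nxt steps _ _ _
      rw [loopB]
      rfl
  | succ f ih =>
      have hmain : ∀ (L d : Int) (v : PySem.Dict (List Int) Int) (p : List Int)
          (rest nxt : List (List Int)) (steps : List (List Int × List Int × Int)),
          pvInvV L v → (∀ x ∈ p :: rest, (x.length : Int) = L + d) →
          (∀ x ∈ nxt, (x.length : Int) = L + d + 1) →
          loopA (f + 1) v ((p :: rest).map (fun x => (x, d)) ++ nxt.map (fun x => (x, d + 1))) steps
            = loopB (f + 1) v (p :: rest) nxt d steps := by
        intro L d v p rest nxt steps hv hf hn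
        simp only [List.map_cons, List.cons_append]
        rw [loopB]
        simp only [loopA, innerA, childrenB]
        obtain ⟨heq, hv', hn'⟩ := pv_foldc_corr p d L (hf p (by simp)) p (fun x hx => hx)
          v nxt steps (rest.map (fun x => (x, d))) hv hn
        simp only [heq]
        exact ih L d _ rest _ _ hv' (fun x hx => hf x (List.mem_cons_of_mem _ hx)) hn'
      intro L d v frontier nxt steps hv hf hn
      cases frontier with
      | cons p rest => exact hmain L d v p rest nxt steps hv hf hn
      | nil =>
          cases nxt with
          | nil => rw [loopB]; rfl
          | cons x rest2 =>
              rw [show loopB (f + 1) v [] (x :: rest2) d steps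
                    = loopB (f + 1) v (x :: rest2) [] (d + 1) steps from by rw [loopB]]
              have h := hmain L (d + 1) v x rest2 [] steps hv
                (by intro y hy; have := hn y hy; omega) (by simp)
              simpa using h

-- ===== VERDICT (by name: the statement is the Claim_ definition above) =====
theorem expand_spec : Claim_equal_expand := by
  unfold Claim_equal_expand Spec_expand
  intro start _
  unfold expand expand_alt
  have hv : pvInvV (start.length : Int) (PySem.Dict.ofList [(start, 0)]) := by
    have hitems : (PySem.Dict.ofList [(start, (0:Int))]).items = [(start, 0)] := rfl
    intro kv hkv
    rw [hitems] at hkv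
    simp at hkv
    subst hkv
    simp
  have h := pv_loop_corr pvFuelExpand (start.length : Int) 0 (PySem.Dict.ofList [(start, 0)])
    [start] [] [] hv (by intro x hx; simp at hx; subst hx; simp) (by simp)
  simpa using h
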